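-- pv_equiv track=rewrite | github.com/viniciusmra/ufpi-pdi-trabalho-final | threshold.py | groupSize
-- ===== SOURCE A (Python) =====
-- def groupSize(groups):
--     sizes = []
--     for group in groups:
--         minX = group[0][0]
--         maxX = group[0][0]
--         minY = group[0][1]
--         maxY = group[0][1]
--         for pixel in group:
--             if(pixel[0] > maxX):
--                 maxX = pixel[0]
--             if(pixel[0] < minX):
--                 minX = pixel[0]
--             if(pixel[1] > maxY):
--                 maxY = pixel[1]
--             if(pixel[1] < minY):
--                 minY = pixel[1]
--         sizes.append((maxX - minX, maxY - minY))
--     return sizes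
-- ===== SOURCE B (Python) =====
-- def groupSize(groups):
--     def span(vals):
--         s = sorted(vals)
--         return s[-1] - s[0]
--     return [(span([p[0] for p in g]), span([p[1] for p in g])) for g in groups]
-- ===== Notes on version B (the rewrite author's own statement) =====
-- stated objective: alternative
-- what changed: Replaces A's single four-accumulator running-extrema loop per group by sorting each coordinate projection and reading the extremes off the sorted list's ends (s[-1]-s[0]); trades A's O(n) scan for an O(n log n) sort with much shorter code.
import Mathlib
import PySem

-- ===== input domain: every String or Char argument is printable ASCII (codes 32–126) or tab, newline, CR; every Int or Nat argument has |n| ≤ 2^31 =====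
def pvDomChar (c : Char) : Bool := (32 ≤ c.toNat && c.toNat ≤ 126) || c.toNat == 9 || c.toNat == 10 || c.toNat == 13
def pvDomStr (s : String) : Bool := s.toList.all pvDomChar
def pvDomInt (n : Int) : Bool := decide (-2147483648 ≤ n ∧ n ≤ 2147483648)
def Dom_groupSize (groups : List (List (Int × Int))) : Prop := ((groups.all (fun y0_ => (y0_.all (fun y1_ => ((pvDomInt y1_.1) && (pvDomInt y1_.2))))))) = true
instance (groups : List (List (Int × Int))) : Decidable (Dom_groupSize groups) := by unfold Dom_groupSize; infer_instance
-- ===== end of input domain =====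

-- B replaces A's single four-accumulator running-extrema loop per group by sorting each
-- coordinate projection and reading the extremes off the sorted list's ends (alternative).


-- ===== PORT A =====
-- A's inner loop: state (minX, maxX, minY, maxY), initialised from group[0],
-- updated by the four comparisons in A's order.
def pvStepA (s : Int × Int × Int × Int) (px : Int × Int) : Int × Int × Int × Int :=
  let maxX := if px.1 > s.2.1 then px.1 else s.2.1
  let minX := if px.1 < s.1 then px.1 else s.1
  let maxY := if px.2 > s.2.2.2 then px.2 else s.2.2.2
  let minY := if px.2 < s.2.2.1 then px.2 else s.2.2.1
  (minX, maxX, minY, maxY)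

def pvBodyA (sizes : List (Int × Int)) (group : List (Int × Int)) : List (Int × Int) :=
  match group with
  | [] => sizes ++ [(0, 0)]  -- group[0][0] raises IndexError in Python: outside Pre_
  | p0 :: _ =>
    let s := group.foldl pvStepA (p0.1, p0.1, p0.2, p0.2)
    sizes ++ [(s.2.1 - s.1, s.2.2.2 - s.2.2.1)]

def groupSize (groups : List (List (Int × Int))) : List (Int × Int) :=
  groups.foldl pvBodyA []

-- ===== PORT B =====
-- Source B's helper span: sort the values, subtract the first sorted element from the last.
def pvSpan (vals : List Int) : Int :=
  match PySem.List.pyGet? (PySem.List.sorted vals (fun v => v) false) (-1),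
        PySem.List.pyGet? (PySem.List.sorted vals (fun v => v) false) 0 with
  | some hi, some lo => hi - lo
  | _, _ => 0  -- empty list: s[-1] raises IndexError in Python; outside Pre_

def groupSize_alt (groups : List (List (Int × Int))) : List (Int × Int) :=
  groups.map (fun g => (pvSpan (g.map (fun p => p.1)), pvSpan (g.map (fun p => p.2))))

-- ===== PRECONDITION & SPEC =====
-- Pre_ excludes exactly the inputs containing an empty group, on which both A and B raise
-- IndexError (A at group[0][0], B at s[-1] on the empty sorted list).
def Pre_groupSize (groups : List (List (Int × Int))) : Prop :=
  ∀ g ∈ groups, g ≠ []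
instance (groups : List (List (Int × Int))) : Decidable (Pre_groupSize groups) := by
  unfold Pre_groupSize; infer_instance
def pvWitness_groupSize : (List (List (Int × Int))) := [[(1, 2), (4, 0)], [(3, 3)]]

def Spec_groupSize (groups : List (List (Int × Int))) (out : List (Int × Int)) : Prop := out = groupSize_alt groups
instance (groups : List (List (Int × Int))) (out : List (Int × Int)) : Decidable (Spec_groupSize groups out) := by unfold Spec_groupSize; infer_instance

-- ===== CLAIM =====
def Claim_equal_groupSize : Prop := ∀ (groups : List (List (Int × Int))), Dom_groupSize groups → Pre_groupSize groups → Spec_groupSize groups (groupSize groups)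

-- ===== LEMMAS AND PROOFS =====

theorem pv_if_gt (x y : Int) : (if x > y then x else y) = max y x := by
  rw [max_def]; split_ifs <;> omega

theorem pv_if_lt (x y : Int) : (if x < y then x else y) = min y x := by
  rw [min_def]; split_ifs <;> omega

-- A's four-accumulator fold computes the four independent min/max folds.
theorem stepA_fold (l : List (Int × Int)) (a b c d : Int) :
    l.foldl pvStepA (a, b, c, d) =
      (l.foldl (fun m p => min m p.1) a,
       l.foldl (fun m p => max m p.1) b,
       l.foldl (fun m p => min m p.2) c,
       l.foldl (fun m p => max m p.2) d) := by
  induction l generalizing a b c d with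
  | nil => rfl
  | cons p t ih =>
    simp only [List.foldl_cons, pvStepA, pv_if_gt, pv_if_lt]
    exact ih _ _ _ _

theorem foldl_max_mem (t : List Int) : ∀ a : Int, t.foldl max a ∈ a :: t := by
  induction t with
  | nil => simp
  | cons b t ih =>
    intro a
    simp only [List.foldl_cons]
    rcases List.mem_cons.1 (ih (max a b)) with h' | h'
    · rcases max_choice a b with h | h <;> rw [h] at h' <;> simp [h, h']
    · simp [h']

theorem le_foldl_max (t : List Int) : ∀ a x : Int, x ∈ a :: t → x ≤ t.foldl max a := by
  induction t with
  | nil => intro a x hx; simp_all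
  | cons b t ih =>
    intro a x hx
    simp only [List.foldl_cons]
    rcases List.mem_cons.1 hx with h | hx'
    · rw [h]; exact le_trans (le_max_left a b) (ih (max a b) _ (by simp))
    · rcases List.mem_cons.1 hx' with h | hx''
      · rw [h]; exact le_trans (le_max_right a b) (ih (max a b) _ (by simp))
      · exact ih (max a b) x (by simp [hx''])

theorem foldl_min_mem (t : List Int) : ∀ a : Int, t.foldl min a ∈ a :: t := by
  induction t with
  | nil => simp
  | cons b t ih =>
    intro a
    simp only [List.foldl_cons]
    rcases List.mem_cons.1 (ih (min a b)) with h' | h'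
    · rcases min_choice a b with h | h <;> rw [h] at h' <;> simp [h, h']
    · simp [h']

theorem foldl_min_le (t : List Int) : ∀ a x : Int, x ∈ a :: t → t.foldl min a ≤ x := by
  induction t with
  | nil => intro a x hx; simp_all
  | cons b t ih =>
    intro a x hx
    simp only [List.foldl_cons]
    rcases List.mem_cons.1 hx with h | hx'
    · rw [h]; exact le_trans (ih (min a b) _ (by simp)) (min_le_left a b)
    · rcases List.mem_cons.1 hx' with h | hx''
      · rw [h]; exact le_trans (ih (min a b) _ (by simp)) (min_le_right a b)
      · exact ih (min a b) x (by simp [hx''])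

-- getLast? yields a member
theorem pv_getLast?_mem (s : List Int) (y : Int) (h : s.getLast? = some y) : y ∈ s := by
  induction s with
  | nil => simp at h
  | cons c r ih =>
    cases r with
    | nil => simp_all
    | cons b rr =>
      rw [List.getLast?_cons_cons] at h
      exact List.mem_cons_of_mem _ (ih h)

-- in a ≤-pairwise list, every element is ≤ the last one
theorem pairwise_le_getLast? (y : Int) :
    ∀ s : List Int, s.Pairwise (· ≤ ·) → s.getLast? = some y → ∀ x ∈ s, x ≤ y := by
  intro s
  induction s with
  | nil => intro _ hy; simp at hy
  | cons c r ih =>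
    intro hp hy x hx
    rcases List.pairwise_cons.1 hp with ⟨hc, hr⟩
    cases r with
    | nil =>
      simp only [List.getLast?_singleton, Option.some.injEq] at hy
      rcases List.mem_cons.1 hx with h | h
      · rw [h, ← hy]
      · simp at h
    | cons b rr =>
      rw [List.getLast?_cons_cons] at hy
      rcases List.mem_cons.1 hx with h | hx'
      · rw [h]; exact le_trans (hc y (pv_getLast?_mem _ _ hy)) le_rfl
      · exact ih hr hy x hx'

-- span of a nonempty list = foldl max − foldl min
theorem span_eq (a : Int) (t : List Int) :
    pvSpan (a :: t) = t.foldl max a - t.foldl min a := by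
  have hne : PySem.List.sorted (a :: t) (fun v => v) false ≠ [] := by
    simp [PySem.List.sorted_eq_nil_iff]
  obtain ⟨m, r, hs⟩ := List.exists_cons_of_ne_nil hne
  have hperm : (PySem.List.sorted (a :: t) (fun v => v) false).Perm (a :: t) :=
    PySem.List.sorted_perm (a :: t) (fun v => v) false
  have hpw : (m :: r).Pairwise (fun x1 x2 : Int => x1 ≤ x2) := by
    rw [← hs]
    simpa using PySem.List.sorted_pairwise (xs := a :: t) (key := fun v => v)
  -- head = min
  have hm_mem : m ∈ a :: t := hperm.mem_iff.1 (by rw [hs]; simp)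
  have hm_le : ∀ y ∈ a :: t, m ≤ y := by
    intro y hy
    simpa using PySem.List.key_head_sorted_le (xs := a :: t) (key := fun v => v) hs y hy
  have hmin : m = t.foldl min a :=
    le_antisymm (hm_le _ (foldl_min_mem t a)) (foldl_min_le t a m hm_mem)
  -- last = max
  obtain ⟨L, hL⟩ : ∃ L, (m :: r).getLast? = some L :=
    ⟨(m :: r).getLast (by simp), List.getLast?_eq_some_getLast (by simp)⟩
  have hLmem : L ∈ a :: t := hperm.mem_iff.1 (by rw [hs]; exact pv_getLast?_mem _ _ hL)
  have hlast : L = t.foldl max a := by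
    apply le_antisymm (le_foldl_max t a L hLmem)
    apply pairwise_le_getLast? L (m :: r) hpw hL
    rw [← hs]
    exact hperm.mem_iff.2 (foldl_max_mem t a)
  -- assemble
  unfold pvSpan
  rw [hs, PySem.List.pyGet?_neg_one, hL, PySem.List.pyGet?_zero_cons]
  show L - m = t.foldl max a - t.foldl min a
  rw [hlast, hmin]

-- the per-group results agree for nonempty groups
theorem size_eq (p0 : Int × Int) (t : List (Int × Int)) :
    pvBodyA [] (p0 :: t) =
      [(pvSpan ((p0 :: t).map (fun p => p.1)), pvSpan ((p0 :: t).map (fun p => p.2)))] := by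
  simp only [pvBodyA, List.map_cons, span_eq]
  rw [stepA_fold]
  simp [List.foldl_map, max_self, min_self]

theorem foldA (gs : List (List (Int × Int))) :
    ∀ acc : List (Int × Int), (∀ g ∈ gs, g ≠ []) →
      gs.foldl pvBodyA acc =
        acc ++ gs.map (fun g => (pvSpan (g.map (fun p => p.1)), pvSpan (g.map (fun p => p.2)))) := by
  induction gs with
  | nil => simp
  | cons g t ih =>
    intro acc hpre
    obtain ⟨p0, rest, rfl⟩ := List.exists_cons_of_ne_nil (hpre g (by simp))
    rw [List.foldl_cons, ih _ (fun x hx => hpre x (by simp [hx])), List.map_cons]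
    have hb : pvBodyA acc (p0 :: rest) =
        acc ++ [(pvSpan ((p0 :: rest).map (fun p => p.1)), pvSpan ((p0 :: rest).map (fun p => p.2)))] := by
      have := size_eq p0 rest
      simp only [pvBodyA] at this ⊢
      simpa using this
    rw [hb]; simp

-- ===== VERDICT =====
theorem groupSize_spec : Claim_equal_groupSize := by
  intro groups _ hpre
  unfold Spec_groupSize groupSize groupSize_alt
  simpa using foldA groups [] hpre
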